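-- pv_equiv track=rewrite | github.com/Wences0812/Works | Simulacro Parcial.py | paresLista
-- ===== SOURCE A (Python) =====
-- def paresLista(lista,i=0):
--     if lista!=[]:
--         if i == len(lista):   # Ultima posicion de la lista
--             return lista
--         else:
--             num=lista[i]
--             if num%2==0:
--                 num=num*2
--                 lista[i]=num
--             return paresLista(lista,i+1)
-- ===== SOURCE B (Python) =====
-- def paresLista(lista, i=0):
--     if not lista:
--         return None
--     for j in range(i, len(lista)):
--         if lista[j] % 2 == 0:
--             lista[j] *= 2
--     return lista
-- ===== Notes on version B (the rewrite author's own statement) =====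
-- stated objective: simpler
-- what changed: Replaces A's tail recursion carrying an index parameter with a plain iterative for-loop over range(i, len(lista)) that doubles even entries in place, avoiding Python's recursion overhead and recursion-depth limit.
import Mathlib
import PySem

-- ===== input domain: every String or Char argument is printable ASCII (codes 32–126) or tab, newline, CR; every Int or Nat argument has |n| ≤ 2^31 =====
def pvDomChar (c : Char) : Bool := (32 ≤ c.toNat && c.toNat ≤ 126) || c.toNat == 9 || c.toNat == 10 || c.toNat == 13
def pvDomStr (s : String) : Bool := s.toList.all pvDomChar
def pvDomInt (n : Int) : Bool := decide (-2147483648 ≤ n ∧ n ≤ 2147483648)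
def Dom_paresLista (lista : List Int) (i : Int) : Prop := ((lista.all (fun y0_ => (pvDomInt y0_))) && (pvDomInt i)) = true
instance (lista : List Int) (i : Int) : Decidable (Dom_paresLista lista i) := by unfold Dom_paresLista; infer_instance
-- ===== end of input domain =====

-- B replaces A's tail recursion with an iterative loop over range(i, len); both mutate
-- the list in place in Python — the equivalence proved here is about the return value.

-- ===== PORT A =====
-- termination helper: a successful pyGet? means the index is strictly below the length
theorem pvGetSome_lt {xs : List Int} {i : Int} {x : Int}
    (h : PySem.List.pyGet? xs i = some x) : i < (xs.length : Int) := by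
  by_contra hge
  have : PySem.List.pyGet? xs i = none := by
    rw [PySem.List.pyGet?_eq_none_iff, PySem.Raise.InRange]
    omega
  simp [this] at h

def paresLista (lista : List Int) (i : Int) : List Int :=
  if lista ≠ [] then
    if i = (lista.length : Int) then lista
    else
      match h : PySem.List.pyGet? lista i with
      | none => []          -- Python raises IndexError here; excluded by Pre_
      | some num =>
        let lista' := if PySem.Int.mod num 2 == 0
                      then PySem.List.pySetD lista i (num * 2) else lista
        paresLista lista' (i + 1)
  else []                    -- Python returns None here; excluded by Pre_
termination_by ((lista.length : Int) - i).toNat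
decreasing_by
  have hlt := pvGetSome_lt h
  split <;> simp [PySem.List.length_pySetD] <;> omega

-- ===== PORT B =====
-- loop body of B's for-loop
def pvStep (acc : List Int) (j : Int) : List Int :=
  match PySem.List.pyGet? acc j with
  | none => acc              -- Python raises IndexError here; excluded by Pre_
  | some v => if PySem.Int.mod v 2 == 0 then PySem.List.pySetD acc j (v * 2) else acc

def paresLista_alt (lista : List Int) (i : Int) : List Int :=
  if lista = [] then []      -- Python returns None here; excluded by Pre_
  else (PySem.List.pyRange i (lista.length : Int) 1).foldl pvStep lista

-- ===== PRECONDITION & SPEC =====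
-- Pre_ excludes the empty list (A returns None, not a list) and start indices outside
-- [-len, len], on which A raises IndexError.
def Pre_paresLista (lista : List Int) (i : Int) : Prop :=
  lista ≠ [] ∧ -(lista.length : Int) ≤ i ∧ i ≤ (lista.length : Int)
instance (lista : List Int) (i : Int) : Decidable (Pre_paresLista lista i) := by
  unfold Pre_paresLista; infer_instance

def pvWitness_paresLista : List Int × Int := ([1, 2, 3], 0)

def Spec_paresLista (lista : List Int) (i : Int) (out : List Int) : Prop := out = paresLista_alt lista i
instance (lista : List Int) (i : Int) (out : List Int) : Decidable (Spec_paresLista lista i out) := by unfold Spec_paresLista; infer_instance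

-- ===== CLAIM (what is proved, stated in full; the proofs are below) =====
def Claim_equal_paresLista : Prop := ∀ (lista : List Int) (i : Int), Dom_paresLista lista i → Pre_paresLista lista i → Spec_paresLista lista i (paresLista lista i)

-- ===== LEMMAS AND PROOFS =====

-- main invariant: on in-range inputs, A's recursion computes B's fold over range(i, len)
theorem pvA_eq_fold (n : Nat) : ∀ (lista : List Int) (i : Int),
    lista ≠ [] → -(lista.length : Int) ≤ i → i ≤ (lista.length : Int) →
    n = ((lista.length : Int) - i).toNat →
    paresLista lista i = (PySem.List.pyRange i (lista.length : Int) 1).foldl pvStep lista := by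
  induction n with
  | zero =>
    intro lista i hne hlo hhi hn
    have hi : i = (lista.length : Int) := by omega
    rw [paresLista.eq_def]
    simp [hne, hi, PySem.List.pyRange_one_eq_nil (le_refl _)]
  | succ m ih =>
    intro lista i hne hlo hhi hn
    have hlt : i < (lista.length : Int) := by omega
    rw [paresLista.eq_def]
    simp only [hne, ne_eq, not_false_eq_true, if_true]
    rw [if_neg (show ¬ i = (lista.length : Int) by omega)]
    split
    next hg =>
      rw [PySem.List.pyGet?_eq_none_iff, PySem.Raise.InRange] at hg
      omega
    next num hg =>
      set lista' := if PySem.Int.mod num 2 == 0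
          then PySem.List.pySetD lista i (num * 2) else lista with hl'
      have hlen : lista'.length = lista.length := by
        rw [hl']; split <;> simp [PySem.List.length_pySetD]
      have hne' : lista' ≠ [] := by
        intro h; rw [h] at hlen; simp at hlen
        exact hne (List.eq_nil_of_length_eq_zero hlen.symm)
      have hrec := ih lista' (i + 1) hne' (by omega) (by omega) (by omega)
      rw [hrec, PySem.List.pyRange_one_cons hlt, List.foldl_cons, hlen]
      have hstep : pvStep lista i = lista' := by
        rw [pvStep, hg]
      rw [hstep]

theorem paresLista_spec : Claim_equal_paresLista := by
  intro lista i _ hpre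
  obtain ⟨hne, hlo, hhi⟩ := hpre
  unfold Spec_paresLista paresLista_alt
  rw [if_neg hne]
  exact pvA_eq_fold ((lista.length : Int) - i).toNat lista i hne hlo hhi rfl
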